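-- pv_equiv track=rewrite | github.com/pypi-data/pypi-mirror-92 | packages/fmridenoise/fmridenoise-0.2.1-py3-none-any.whl/fmridenoise/interfaces/bids.py | _lists_to_entities
-- ===== SOURCE A (Python) =====
-- from itertools import product
-- import typing as t
--
-- def _lists_to_entities(subjects: list, tasks: list, sessions: t.List[str], runs: t.List[str]):
--     """
--     Convert lists of subjects, tasks and sessions into list of dictionaries
--     (entities). It handles empty session list.
--     """
--
--     keys = ['subject', 'task']
--     prod_elements = [subjects, tasks]
--     if sessions:
--         keys.append('session')
--         prod_elements.append(sessions)
--     if runs: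
--         keys.append('run')
--         prod_elements.append(runs)
--
--     return [{key: value for key, value in zip(keys, entity)} for entity in product(*prod_elements)]
-- ===== SOURCE B (Python) =====
-- def _lists_to_entities(subjects, tasks, sessions, runs):
--     """Same result as A, built by stepwise accumulation instead of itertools.product."""
--     pairs = [('subject', subjects), ('task', tasks)]
--     if sessions:
--         pairs.append(('session', sessions))
--     if runs:
--         pairs.append(('run', runs))
--     acc = [{}]
--     for key, values in pairs:
--         acc = [{**d, key: v} for d in acc for v in values]
--     return acc
-- ===== Notes on version B (the rewrite author's own statement) =====
-- stated objective: simpler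
-- what changed: Replaces itertools.product plus per-tuple zip-into-dict with a stepwise fold that extends [{}] one (key, values) pair at a time.
import Mathlib
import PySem

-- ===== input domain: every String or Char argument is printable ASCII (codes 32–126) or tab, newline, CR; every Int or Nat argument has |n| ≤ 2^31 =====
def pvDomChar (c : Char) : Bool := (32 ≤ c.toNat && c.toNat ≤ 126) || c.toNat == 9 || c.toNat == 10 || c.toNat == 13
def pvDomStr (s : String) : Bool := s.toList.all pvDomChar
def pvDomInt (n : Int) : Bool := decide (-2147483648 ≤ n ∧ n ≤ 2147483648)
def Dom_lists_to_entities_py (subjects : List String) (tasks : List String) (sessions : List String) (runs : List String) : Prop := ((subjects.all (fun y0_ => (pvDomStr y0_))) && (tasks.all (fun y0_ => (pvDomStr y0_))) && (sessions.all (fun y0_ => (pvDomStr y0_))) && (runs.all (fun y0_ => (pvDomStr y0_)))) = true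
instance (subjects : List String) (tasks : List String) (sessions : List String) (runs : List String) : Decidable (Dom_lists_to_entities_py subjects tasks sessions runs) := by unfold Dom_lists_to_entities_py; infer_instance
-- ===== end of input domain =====

-- B builds the same list of entity dicts by a stepwise fold over (key, values) pairs instead of itertools.product + zip (objective: simpler decomposition).

-- ===== PORT A =====
-- itertools.product(*pools): leftmost pool varies slowest
def pvProduct (pools : List (List String)) : List (List String) :=
  match pools with
  | [] => [[]]
  | l :: ls => l.flatMap (fun x => (pvProduct ls).map (fun rest => x :: rest))

def lists_to_entities_py (subjects : List String) (tasks : List String) (sessions : List String) (runs : List String) : List (List (String × String)) :=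
  let keys := ["subject", "task"]
  let prodElements := [subjects, tasks]
  let kp := if sessions ≠ [] then (keys ++ ["session"], prodElements ++ [sessions]) else (keys, prodElements)
  let kp := if runs ≠ [] then (kp.1 ++ ["run"], kp.2 ++ [runs]) else kp
  -- the dict comprehension over zip(keys, entity): keys are distinct, so the dict is the zipped association list
  (pvProduct kp.2).map (fun entity => List.zip kp.1 entity)

-- ===== PORT B =====
-- one fold step: acc = [{**d, key: v} for d in acc for v in values] (key is always fresh, so {**d, key: v} = d ++ [(key, v)])
def pvExtend (acc : List (List (String × String))) (key : String) (values : List String) : List (List (String × String)) :=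
  acc.flatMap (fun d => values.map (fun v => d ++ [(key, v)]))

def lists_to_entities_py_alt (subjects : List String) (tasks : List String) (sessions : List String) (runs : List String) : List (List (String × String)) :=
  let pairs := [("subject", subjects), ("task", tasks)]
  let pairs := if sessions ≠ [] then pairs ++ [("session", sessions)] else pairs
  let pairs := if runs ≠ [] then pairs ++ [("run", runs)] else pairs
  pairs.foldl (fun acc kv => pvExtend acc kv.1 kv.2) [[]]

-- ===== PRECONDITION & SPEC =====
def Spec_lists_to_entities_py (subjects : List String) (tasks : List String) (sessions : List String) (runs : List String) (out : List (List (String × String))) : Prop := out = lists_to_entities_py_alt subjects tasks sessions runs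
instance (subjects : List String) (tasks : List String) (sessions : List String) (runs : List String) (out : List (List (String × String))) : Decidable (Spec_lists_to_entities_py subjects tasks sessions runs out) := by unfold Spec_lists_to_entities_py; infer_instance

-- ===== CLAIM (what is proved, stated in full; the proofs are below) =====
def Claim_equal_lists_to_entities_py : Prop := ∀ (subjects : List String) (tasks : List String) (sessions : List String) (runs : List String), Dom_lists_to_entities_py subjects tasks sessions runs → Spec_lists_to_entities_py subjects tasks sessions runs (lists_to_entities_py subjects tasks sessions runs)

-- ===== LEMMAS AND PROOFS =====

-- ===== VERDICT (by name: the statement is the Claim_ definition above) =====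
lemma foldl_pvExtend (pairs : List (String × List String)) (acc : List (List (String × String))) :
    pairs.foldl (fun acc kv => pvExtend acc kv.1 kv.2) acc =
      acc.flatMap (fun d => (pvProduct (pairs.map Prod.snd)).map (fun e => d ++ (pairs.map Prod.fst).zip e)) := by
  induction pairs generalizing acc with
  | nil => simp [pvProduct]
  | cons kv ps ih =>
      rw [List.foldl_cons, ih]
      simp [pvExtend, pvProduct, List.flatMap_def, List.map_map, Function.comp_def,
        List.flatten_flatten]

theorem lists_to_entities_py_spec : Claim_equal_lists_to_entities_py := by
  intro subjects tasks sessions runs _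
  unfold Spec_lists_to_entities_py lists_to_entities_py lists_to_entities_py_alt
  by_cases hs : sessions = [] <;> by_cases hr : runs = [] <;>
    simp only [hs, hr, ne_eq, not_true_eq_false, not_false_eq_true, if_true, if_false,
      foldl_pvExtend] <;>
    simp [List.flatMap_def]
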